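-- pv_equiv track=rewrite | github.com/PoyrazTahan/assortment_automation | prep_tree.py | __map_distribution
-- ===== SOURCE A (Python) =====
-- def __map_distribution(K, N): #TODO: Improve this algorithm with Dynamic programming memoization
--     all_combinations = []
--     for x in range(N**K):
--         t = x
--         l = [[] for _ in range(N)]
--         for i in range(K):
--             id = t % N
--             t = t // N   #integer division
--             l[id].append(i)
--         all_combinations.append(l)
--
--     return all_combinations
-- ===== SOURCE B (Python) =====
-- def _stack_to_list(s):
--     # flatten a cons-stack (item, rest)/None into a list; items were pushed
--     # most-recent-first, so reverse to get ascending order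
--     out = []
--     while s is not None:
--         out.append(s[0])
--         s = s[1]
--     out.reverse()
--     return out
--
--
-- def __map_distribution(K, N):
--     # Item-by-item expansion instead of base-N digit extraction: start from one
--     # partial assignment of N empty buckets; for each item i, replace every
--     # partial assignment by its N extensions, one per bucket (bucket b outermost
--     # so that item 0 stays the fastest-varying coordinate, matching the base-N
--     # counter order of the original). Buckets are kept as shared cons-stacks so
--     # an extension costs O(N), and are flattened once at the end.
--     partials = [[None] * N]
--     for i in range(K):
--         new = []
--         for b in range(N):
--             for p in partials:
--                 new.append([(i, s) if j == b else s for j, s in enumerate(p)])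
--         partials = new
--     return [[_stack_to_list(s) for s in p] for p in partials]
-- ===== Notes on version B (the rewrite author's own statement) =====
-- stated objective: alternative
-- what changed: Replaces the base-N counter over range(N**K) with digit extraction per x by an incremental item-by-item expansion: starting from one assignment of N empty buckets, each item multiplies the list of partial assignments by its N bucket choices (bucket loop outermost so item 0 varies fastest, preserving A's order).
import Mathlib
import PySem

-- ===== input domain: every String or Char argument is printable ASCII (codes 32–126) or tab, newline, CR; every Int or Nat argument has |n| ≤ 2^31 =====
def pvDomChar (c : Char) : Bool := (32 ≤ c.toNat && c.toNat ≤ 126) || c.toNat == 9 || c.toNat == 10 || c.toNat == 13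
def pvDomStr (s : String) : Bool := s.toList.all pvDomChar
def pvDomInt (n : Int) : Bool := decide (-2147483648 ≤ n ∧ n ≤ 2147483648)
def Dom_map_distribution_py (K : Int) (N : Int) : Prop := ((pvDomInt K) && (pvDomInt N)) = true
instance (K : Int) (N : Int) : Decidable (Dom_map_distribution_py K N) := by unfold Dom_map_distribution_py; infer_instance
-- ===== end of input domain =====

-- B replaces A's base-N counter (x over range(N**K) with digits extracted by % and //)
-- by an item-by-item expansion of partial assignments kept as shared prepend-stacks:
-- an alternative decomposition of the same enumeration, same value and order (no speed claim).

-- ===== PORT A =====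
-- literal port of __map_distribution: for x in range(N**K), extract K base-N digits;
-- l[id].append(i) is ported as pyGetD/pySetD (the index is in range on Pre_)
def map_distribution_py (K : Int) (N : Int) : List (List (List Int)) :=
  (PySem.List.pyRange 0 (N ^ K.toNat) 1).foldl
    (fun all_combinations x =>
      let l0 : List (List Int) := (PySem.List.pyRange 0 N 1).map (fun _ => [])
      let res :=
        (PySem.List.pyRange 0 K 1).foldl
          (fun s i =>
            let id := PySem.Int.mod s.1 N
            let t := PySem.Int.floordiv s.1 N
            (t, PySem.List.pySetD s.2 id (PySem.List.pyGetD s.2 id [] ++ [i])))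
          (x, l0)
      all_combinations ++ [res.2])
    []

-- ===== PORT B =====
-- Source B's cons-stack (i, rest)/None is modelled as List Int (None = [], (i, s) = i :: s);
-- _stack_to_list walks the stack front to back and reverses, i.e. List.reverse
def map_distribution_py_alt (K : Int) (N : Int) : List (List (List Int)) :=
  let partials :=
    (PySem.List.pyRange 0 K 1).foldl
      (fun partials i =>
        (PySem.List.pyRange 0 N 1).foldl
          (fun new b =>
            new ++ partials.map (fun p =>
              (PySem.List.enumerate p 0).map
                (fun js => if js.1 == b then i :: js.2 else js.2)))
          [])
      [(PySem.List.pyRange 0 N 1).map (fun _ => [])]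
  partials.map (fun p => p.map (fun s => s.reverse))

-- ===== PRECONDITION & SPEC =====
-- Pre_ is exactly the inputs on which A returns normally: negative K raises TypeError
-- (range() on the float N**K), and negative N with even K ≥ 2 raises IndexError
-- (l is empty but range(N**K) is not); every other input is admitted.
def Pre_map_distribution_py (K : Int) (N : Int) : Prop :=
  0 ≤ K ∧ (0 ≤ N ∨ K = 0 ∨ K % 2 = 1)
instance (K : Int) (N : Int) : Decidable (Pre_map_distribution_py K N) := by
  unfold Pre_map_distribution_py; infer_instance
def pvWitness_map_distribution_py : Int × Int := (2, 2)
def Spec_map_distribution_py (K : Int) (N : Int) (out : List (List (List Int))) : Prop := out = map_distribution_py_alt K N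
instance (K : Int) (N : Int) (out : List (List (List Int))) : Decidable (Spec_map_distribution_py K N out) := by unfold Spec_map_distribution_py; infer_instance

-- ===== CLAIM (what is proved, stated in full; the proofs are below) =====
def Claim_equal_map_distribution_py : Prop := ∀ (K : Int) (N : Int), Dom_map_distribution_py K N → Pre_map_distribution_py K N → Spec_map_distribution_py K N (map_distribution_py K N)

-- ===== LEMMAS AND PROOFS =====

-- A's inner-loop step (digit extraction + bucket update), named for the proofs
def pvStepA (N : Int) (s : Int × List (List Int)) (i : Int) : Int × List (List Int) :=
  let id := PySem.Int.mod s.1 N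
  let t := PySem.Int.floordiv s.1 N
  (t, PySem.List.pySetD s.2 id (PySem.List.pyGetD s.2 id [] ++ [i]))

-- B's bucket push (the enumerate/map comprehension), named for the proofs
def pvExtB (p : List (List Int)) (b i : Int) : List (List Int) :=
  (PySem.List.enumerate p 0).map (fun js => if js.1 == b then i :: js.2 else js.2)

-- B's outer step
def pvStepB (N : Int) (partials : List (List (List Int))) (i : Int) : List (List (List Int)) :=
  (PySem.List.pyRange 0 N 1).foldl (fun new b => new ++ partials.map (fun p => pvExtB p b i)) []

def pvEmpt (N : Int) : List (List Int) := (PySem.List.pyRange 0 N 1).map (fun _ => [])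

-- A's decoded assignment for counter value x over k items
def pvInnA (N : Int) (k : Nat) (x : Int) : List (List Int) :=
  (List.foldl (pvStepA N) (x, pvEmpt N) (PySem.List.pyRange 0 (k : Int) 1)).2

lemma pvPortA_eq (K N : Int) :
    map_distribution_py K N
      = (PySem.List.pyRange 0 (N ^ K.toNat) 1).map
          (fun x => (List.foldl (pvStepA N) (x, pvEmpt N) (PySem.List.pyRange 0 K 1)).2) := by
  rw [show map_distribution_py K N
      = List.foldl (fun acc x => acc ++ [(List.foldl (pvStepA N) (x, pvEmpt N) (PySem.List.pyRange 0 K 1)).2]) []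
          (PySem.List.pyRange 0 (N ^ K.toNat) 1) from rfl]
  rw [PySem.List.foldl_append_singleton_eq_map]
  simp

lemma pvPortB_eq (K N : Int) :
    map_distribution_py_alt K N
      = (List.foldl (pvStepB N) [pvEmpt N] (PySem.List.pyRange 0 K 1)).map
          (fun p => p.map (fun s => s.reverse)) := rfl

lemma pvStepA_snd_length (N : Int) (is : List Int) :
    ∀ (s : Int × List (List Int)), (List.foldl (pvStepA N) s is).2.length = s.2.length := by
  induction is with
  | nil => intro s; rfl
  | cons i is ih =>
      intro s
      simp only [List.foldl_cons, ih]
      simp [pvStepA, PySem.List.length_pySetD]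

-- high digits do not influence the buckets: shifting the counter by b·N^|is|
-- leaves every update unchanged and lands the counter on b
lemma pvShift (N : Int) (hN : 0 ≤ N) (is : List Int) :
    ∀ (b t : Int) (l : List (List Int)), 0 ≤ t → t < N ^ is.length → 0 ≤ b →
      List.foldl (pvStepA N) (b * N ^ is.length + t, l) is
        = (b, (List.foldl (pvStepA N) (t, l) is).2) := by
  induction is with
  | nil =>
      intro b t l ht htlt hb
      simp only [List.length_nil, pow_zero] at htlt ⊢
      have : t = 0 := by omega
      subst this; simp
  | cons i is ih =>
      intro b t l ht htlt hb
      have hNpos : 0 < N := by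
        rcases lt_or_eq_of_le hN with h | h
        · exact h
        · exfalso; rw [← h] at htlt; simp [List.length_cons] at htlt; omega
      have hsplit : b * N ^ (i :: is).length + t = t + b * N ^ is.length * N := by
        simp [List.length_cons, pow_succ]; ring
      have hmod : PySem.Int.mod (b * N ^ (i :: is).length + t) N = PySem.Int.mod t N := by
        rw [PySem.Int.mod_eq_emod_of_pos hNpos, PySem.Int.mod_eq_emod_of_pos hNpos, hsplit,
          Int.add_mul_emod_self_right _ _ _]
      have hdiv : PySem.Int.floordiv (b * N ^ (i :: is).length + t) N
          = b * N ^ is.length + PySem.Int.floordiv t N := by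
        rw [PySem.Int.floordiv_eq_ediv_of_pos hNpos, PySem.Int.floordiv_eq_ediv_of_pos hNpos, hsplit,
          Int.add_mul_ediv_right _ _ (ne_of_gt hNpos)]
        ring
      simp only [List.foldl_cons, pvStepA, hmod, hdiv]
      exact ih b (PySem.Int.floordiv t N) _
        (by rw [PySem.Int.floordiv_eq_ediv_of_pos hNpos]; exact Int.ediv_nonneg ht (le_of_lt hNpos))
        (by rw [PySem.Int.floordiv_eq_ediv_of_pos hNpos]
            rw [Int.ediv_lt_iff_lt_mul hNpos]
            calc t < N ^ (i :: is).length := htlt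
              _ = N ^ is.length * N := by simp [List.length_cons, pow_succ]
        ) hb

-- decomposition of range (a*b) by the most significant digit
lemma pvRangeMul (a b : Nat) :
    List.range (a * b) = (List.range a).flatMap (fun i => (List.range b).map (fun j => i * b + j)) := by
  induction a with
  | zero => simp
  | succ a ih =>
      have h : (a + 1) * b = a * b + b := by ring
      rw [h, List.range_add, List.range_succ, List.flatMap_append, ← ih]
      simp

-- an enumerate/map comprehension that modifies position m < start is the identity
lemma pvEnum_id (f : List Int → List Int) : ∀ (l : List (List Int)) (s m : Int), m < s →
    (PySem.List.enumerate l s).map (fun jb => if jb.1 == m then f jb.2 else jb.2) = l := by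
  intro l
  induction l with
  | nil => intro s m h; rfl
  | cons x l ih =>
      intro s m h
      rw [PySem.List.enumerate_cons]
      simp only [List.map_cons]
      rw [ih (s + 1) m (by omega)]
      have : (s == m) = false := by simp; omega
      simp [this]

-- an enumerate/map comprehension that modifies position s + n is List.set
lemma pvEnum_set (f : List Int → List Int) :
    ∀ (l : List (List Int)) (s : Int) (n : Nat) (h : n < l.length),
      (PySem.List.enumerate l s).map (fun jb => if jb.1 == s + (n : Int) then f jb.2 else jb.2)
        = l.set n (f l[n]) := by
  intro l
  induction l with
  | nil => intro s n h; simp at h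
  | cons x l ih =>
      intro s n h
      rw [PySem.List.enumerate_cons]
      simp only [List.map_cons]
      cases n with
      | zero =>
          simp only [Nat.cast_zero, add_zero, beq_self_eq_true, if_pos]
          rw [pvEnum_id f l (s + 1) s (by omega)]
          simp
      | succ n =>
          have harg : s + ((n.succ : Nat) : Int) = (s + 1) + (n : Int) := by push_cast; ring
          rw [harg]
          rw [ih (s + 1) n (by simpa using h)]
          have hs2 : (s == s + 1 + (n : Int)) = false := by simp; omega
          simp [hs2]

-- A's in-place append at bucket b, seen through the stack representation,
-- is B's prepend at bucket b
lemma pvExt_rev (l : List (List Int)) (b i : Int) (hb0 : 0 ≤ b) (hb : b < l.length) :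
    pvExtB (l.map List.reverse) b i
      = (PySem.List.pySetD l b (PySem.List.pyGetD l b [] ++ [i])).map List.reverse := by
  have hb' : b.toNat < l.length := by omega
  have hbe : b = 0 + ((b.toNat : Nat) : Int) := by omega
  rw [PySem.List.pySetD_of_nonneg _ _ hb0,
    PySem.List.pyGetD_eq_getElem _ _ hb0 (by exact_mod_cast hb),
    List.map_set]
  unfold pvExtB
  conv_lhs => rw [hbe]
  rw [pvEnum_set (fun s => i :: s) (l.map List.reverse) 0 b.toNat (by simpa using hb')]
  simp

lemma pvEmpt_length (n : Nat) : (pvEmpt (n : Int)).length = n := by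
  simp [pvEmpt, PySem.List.length_pyRange_one]

lemma pvInnA_length (n : Nat) (k : Nat) (x : Int) : (pvInnA (n : Int) k x).length = n := by
  unfold pvInnA
  rw [pvStepA_snd_length]
  exact pvEmpt_length n

-- peeling the most significant digit of the counter
lemma pvInnA_succ (n k bn rn : Nat) (hb : bn < n) (hr : rn < n ^ k) :
    pvInnA (n : Int) (k + 1) ((bn : Int) * (n : Int) ^ k + (rn : Int))
      = PySem.List.pySetD (pvInnA (n : Int) k (rn : Int)) (bn : Int)
          (PySem.List.pyGetD (pvInnA (n : Int) k (rn : Int)) (bn : Int) [] ++ [(k : Int)]) := by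
  have hn : (0:Int) < (n:Int) := by exact_mod_cast Nat.pos_of_ne_zero (by omega)
  unfold pvInnA
  have hk1 : ((k + 1 : Nat) : Int) = (k : Int) + 1 := by push_cast; ring
  rw [hk1, PySem.List.pyRange_one_succ_right (by positivity : (0:Int) ≤ (k:Int)), List.foldl_append]
  have hlen : (PySem.List.pyRange 0 (k : Int) 1).length = k := by
    simp [PySem.List.length_pyRange_one]
  have hshift := pvShift (n : Int) (le_of_lt hn) (PySem.List.pyRange 0 (k : Int) 1)
    (bn : Int) (rn : Int) (pvEmpt (n : Int)) (by positivity)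
    (by rw [hlen]; exact_mod_cast hr) (by positivity)
  rw [hlen] at hshift
  rw [hshift]
  simp only [List.foldl_cons, List.foldl_nil, pvStepA]
  have hmod : PySem.Int.mod (bn : Int) (n : Int) = (bn : Int) := by
    rw [PySem.Int.mod_eq_emod_of_pos hn]
    exact Int.emod_eq_of_lt (by positivity) (by exact_mod_cast hb)
  rw [hmod]

-- the reverse of a reversed partial is itself (all buckets are built by A in
-- ascending item order, B keeps them reversed)
lemma pvEmpt_rev (N : Int) : (pvEmpt N).map List.reverse = pvEmpt N := by
  simp [pvEmpt]

-- the key invariant: B's partial table after k items is A's list of decodes,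
-- bucket-reversed
lemma pvMain (n : Nat) : ∀ (k : Nat),
    List.foldl (pvStepB (n : Int)) [pvEmpt (n : Int)] (PySem.List.pyRange 0 (k : Int) 1)
      = (PySem.List.pyRange 0 ((n ^ k : Nat) : Int) 1).map
          (fun x => (pvInnA (n : Int) k x).map List.reverse) := by
  intro k
  induction k with
  | zero =>
      rw [Nat.cast_zero, PySem.List.pyRange_one_eq_nil (le_refl 0)]
      simp only [List.foldl_nil, pow_zero, Nat.cast_one]
      rw [show PySem.List.pyRange 0 1 1 = [0] from rfl]
      simp [pvInnA, PySem.List.pyRange_one_eq_nil (le_refl (0:Int)), pvEmpt_rev]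
  | succ k ih =>
      have hk : ((k + 1 : Nat) : Int) = (k : Int) + 1 := by push_cast; ring
      rw [hk, PySem.List.pyRange_one_succ_right (by positivity), List.foldl_append,
        List.foldl_cons, List.foldl_nil, ih]
      unfold pvStepB
      rw [PySem.List.foldl_append_eq_flatMap, List.nil_append]
      rw [PySem.List.pyRange_zero_natCast, PySem.List.pyRange_zero_natCast,
        PySem.List.pyRange_zero_natCast]
      rw [show n ^ (k + 1) = n * n ^ k from pow_succ' n k, pvRangeMul n (n ^ k)]
      simp only [List.flatMap_map, List.map_flatMap, List.map_map]
      apply List.flatMap_congr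
      intro b hb
      apply List.map_congr_left
      intro r hr
      simp only [Function.comp]
      rw [show ((b * n ^ k + r : Nat) : Int) = (b : Int) * (n : Int) ^ k + (r : Int) by push_cast; ring]
      rw [pvInnA_succ n k b r (List.mem_range.mp hb) (List.mem_range.mp hr)]
      rw [pvExt_rev _ _ _ (by positivity)
        (by rw [pvInnA_length]; exact_mod_cast List.mem_range.mp hb)]

lemma pvStepB_nil (N i : Int) : pvStepB N [] i = [] := by
  unfold pvStepB
  induction PySem.List.pyRange 0 N 1 with
  | nil => rfl
  | cons x l ih => simp

lemma pvFoldl_stepB_nil (N : Int) (l : List Int) : List.foldl (pvStepB N) [] l = [] := by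
  induction l with
  | nil => rfl
  | cons x l ih => simp only [List.foldl_cons, pvStepB_nil, ih]

-- ===== VERDICT (by name: the statement is the Claim_ definition above) =====
theorem map_distribution_py_spec : Claim_equal_map_distribution_py := by
  intro K N _ hpre
  unfold Spec_map_distribution_py
  obtain ⟨hK, hcase⟩ := hpre
  rw [pvPortA_eq, pvPortB_eq]
  by_cases hN : 0 ≤ N
  · obtain ⟨n, rfl⟩ : ∃ n : Nat, N = (n : Int) := ⟨N.toNat, (Int.toNat_of_nonneg hN).symm⟩
    obtain ⟨k, rfl⟩ : ∃ k : Nat, K = (k : Int) := ⟨K.toNat, (Int.toNat_of_nonneg hK).symm⟩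
    rw [Int.toNat_natCast, pvMain n k,
      show ((n : Int)) ^ k = ((n ^ k : Nat) : Int) by push_cast; ring]
    simp [List.map_map, Function.comp, pvInnA]
  · have hN' : N < 0 := by omega
    rcases hcase with h | hK0 | hKodd
    · omega
    · subst hK0
      rw [show (0:Int).toNat = 0 from rfl]
      simp only [pow_zero]
      rw [show PySem.List.pyRange 0 1 1 = [0] from rfl,
        PySem.List.pyRange_one_eq_nil (le_refl (0:Int))]
      simp [pvEmpt, PySem.List.pyRange_one_eq_nil (le_of_lt hN')]
    · have hK1 : 0 < K := by omega
      have hodd : N ^ K.toNat < 0 := by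
        apply Odd.pow_neg _ hN'
        rw [Nat.odd_iff]
        omega
      rw [PySem.List.pyRange_one_eq_nil (le_of_lt hodd), List.map_nil,
        PySem.List.pyRange_one_cons hK1, List.foldl_cons]
      rw [show pvStepB N [pvEmpt N] 0
          = List.foldl (fun new b => new ++ [pvEmpt N].map (fun p => pvExtB p b 0)) []
              (PySem.List.pyRange 0 N 1) from rfl]
      rw [PySem.List.pyRange_one_eq_nil (le_of_lt hN'), List.foldl_nil]
      rw [pvFoldl_stepB_nil]
      rfl
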